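-- pv_equiv track=rewrite | github.com/taravskayavm/email_bot | crawler/section_discovery.py | _top_prefix
-- ===== SOURCE A (Python) =====
-- def _top_prefix(path: str) -> str:
--     """Return the top-most path segment prefixed with ``/``."""
--
--     clean = (path or "/").split("?", 1)[0]
--     if not clean.startswith("/"):
--         clean = "/" + clean
--     parts = [segment for segment in clean.split("/") if segment]
--     if not parts:
--         return "/"
--     return "/" + parts[0]
-- ===== SOURCE B (Python) =====
-- def _top_prefix(path: str) -> str:
--     """Return the top-most path segment prefixed with ``/``."""
--     i, n = 0, len(path)
--     while i < n and path[i] == "/":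
--         i += 1
--     j = i
--     while j < n and path[j] != "/" and path[j] != "?":
--         j += 1
--     return "/" + path[i:j]
-- ===== Notes on version B (the rewrite author's own statement) =====
-- stated objective: simpler
-- what changed: Replaces the split-on-'?' / prepend-slash / split-on-'/' / filter pipeline (which builds several intermediate lists) with a single two-pointer scan over the characters: skip leading slashes, then take characters up to the next '/' or '?'.
import Mathlib
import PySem

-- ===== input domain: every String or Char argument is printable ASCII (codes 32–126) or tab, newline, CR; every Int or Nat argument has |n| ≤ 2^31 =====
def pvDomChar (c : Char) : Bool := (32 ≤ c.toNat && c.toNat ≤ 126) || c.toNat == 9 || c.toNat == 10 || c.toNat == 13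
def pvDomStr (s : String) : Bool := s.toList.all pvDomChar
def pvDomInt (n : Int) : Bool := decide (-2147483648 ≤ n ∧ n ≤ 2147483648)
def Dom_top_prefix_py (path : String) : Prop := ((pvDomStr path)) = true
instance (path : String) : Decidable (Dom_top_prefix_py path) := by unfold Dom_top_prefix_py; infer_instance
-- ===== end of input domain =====

-- B replaces A's split/filter pipeline with a single two-pointer scan (skip leading slashes, take up to '/' or '?'); objective: simpler.


-- ===== PORT A =====
-- literal transliteration of A: (path or "/").split("?", 1)[0]; prepend "/" if missing;
-- split on "/", keep truthy segments; "/" if none, else "/" + parts[0].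
-- The .getD fallbacks are never hit: the separators are nonempty literals and
-- Python's split always returns a nonempty list, so [0] cannot raise.
def top_prefix_py (path : String) : String :=
  let base := if path = "" then "/" else path
  let clean1 := (PySem.List.pyGet? ((PySem.Str.splitMax? base "?" 1).getD []) 0).getD ""
  let clean := if PySem.Str.startswith clean1 "/" then clean1 else "/" ++ clean1
  let parts := ((PySem.Str.split? clean "/").getD []).filter (fun s => s ≠ "")
  if parts = [] then "/" else "/" ++ (PySem.List.pyGet? parts 0).getD ""

-- ===== PORT B =====
-- first while loop of Source B: advance past leading '/' characters
def pvSkipSlash : List Char → List Char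
  | [] => []
  | c :: rest => if c = '/' then pvSkipSlash rest else c :: rest

-- second while loop of Source B: take characters until '/' or '?' (the slice path[i:j])
def pvSeg : List Char → List Char
  | [] => []
  | c :: rest => if c = '/' ∨ c = '?' then [] else c :: pvSeg rest

def top_prefix_py_alt (path : String) : String :=
  "/" ++ String.ofList (pvSeg (pvSkipSlash path.toList))

-- ===== PRECONDITION & SPEC =====
def Spec_top_prefix_py (path : String) (out : String) : Prop := out = top_prefix_py_alt path
instance (path : String) (out : String) : Decidable (Spec_top_prefix_py path out) := by unfold Spec_top_prefix_py; infer_instance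

-- ===== CLAIM (what is proved, stated in full; the proofs are below) =====
def Claim_equal_top_prefix_py : Prop := ∀ (path : String), Dom_top_prefix_py path → Spec_top_prefix_py path (top_prefix_py path)

-- ===== LEMMAS AND PROOFS =====

-- run of Python's split by "/": (first segment, remaining segments)
def pvSplitSlash : List Char → List Char × List (List Char)
  | [] => ([], [])
  | c :: rest =>
    if c = '/' then ([], (pvSplitSlash rest).1 :: (pvSplitSlash rest).2)
    else (c :: (pvSplitSlash rest).1, (pvSplitSlash rest).2)

-- go with maxsplit budget 0 emits the remainder as the final piece
lemma go_max_zero (sep : List Char) (fuel : Nat) (l : List Char) (acc : List (List Char)) :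
    PySem.Chars.splitOnMax.go sep fuel 0 l [] acc = (l :: acc).reverse := by
  cases fuel with
  | zero => simp [PySem.Chars.splitOnMax.go]
  | succ f => cases l with
    | nil => simp [PySem.Chars.splitOnMax.go]
    | cons c rest => simp [PySem.Chars.splitOnMax.go]

-- split("?", 1): the first piece is everything before the first '?'
lemma go_max_one (l : List Char) (fuel : Nat) (cur : List Char) (acc : List (List Char))
    (h : l.length ≤ fuel) :
    PySem.Chars.splitOnMax.go ['?'] fuel 1 l cur acc =
      (if '?' ∈ l
        then (((l.dropWhile (· ≠ '?')).drop 1) :: (cur.reverse ++ l.takeWhile (· ≠ '?')) :: acc)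
        else ((cur.reverse ++ l.takeWhile (· ≠ '?')) :: acc)).reverse := by
  induction l generalizing fuel cur acc with
  | nil => cases fuel with
    | zero => simp [PySem.Chars.splitOnMax.go]
    | succ f => simp [PySem.Chars.splitOnMax.go]
  | cons c rest ih =>
    cases fuel with
    | zero => simp at h
    | succ f =>
      by_cases hc : c = '?'
      · subst hc
        simp [PySem.Chars.splitOnMax.go, List.isPrefixOf, go_max_zero]
      · have hpre : List.isPrefixOf ['?'] (c :: rest) = false := by
          simp [List.isPrefixOf]
          exact fun hq => hc hq.symm
        rw [show PySem.Chars.splitOnMax.go ['?'] (f + 1) 1 (c :: rest) cur acc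
              = PySem.Chars.splitOnMax.go ['?'] f 1 rest (c :: cur) acc by
            simp [PySem.Chars.splitOnMax.go, hpre]]
        rw [ih f (c :: cur) acc (by simpa using Nat.le_of_succ_le_succ h)]
        by_cases hm : '?' ∈ rest <;>
          simp [hm, hc, Ne.symm hc]

-- first segment equals the '?'-free take
lemma splitSlash_fst (l : List Char) (h : '?' ∉ l) : (pvSplitSlash l).1 = pvSeg l := by
  induction l with
  | nil => rfl
  | cons c rest ih =>
    simp at h
    by_cases hc : c = '/'
    · simp [pvSplitSlash, pvSeg, hc]
    · simp [pvSplitSlash, pvSeg, hc, Ne.symm h.1, ih h.2]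

-- split("/") at the go level: accumulator-passing run equals pvSplitSlash
lemma go_slash (l : List Char) (fuel : Nat) (cur : List Char) (acc : List (List Char))
    (h : l.length ≤ fuel) :
    PySem.Chars.splitOn.go ['/'] fuel l cur acc =
      acc.reverse ++ (cur.reverse ++ (pvSplitSlash l).1) :: (pvSplitSlash l).2 := by
  induction l generalizing fuel cur acc with
  | nil => cases fuel with
    | zero => simp [PySem.Chars.splitOn.go, pvSplitSlash]
    | succ f => simp [PySem.Chars.splitOn.go, pvSplitSlash]
  | cons c rest ih =>
    cases fuel with
    | zero => simp at h
    | succ f =>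
      by_cases hc : c = '/'
      · subst hc
        rw [show PySem.Chars.splitOn.go ['/'] (f + 1) ('/' :: rest) cur acc
              = PySem.Chars.splitOn.go ['/'] f rest [] (cur.reverse :: acc) by
            simp [PySem.Chars.splitOn.go, List.isPrefixOf]]
        rw [ih f [] (cur.reverse :: acc) (by simpa using Nat.le_of_succ_le_succ h)]
        simp [pvSplitSlash]
      · have hpre : List.isPrefixOf ['/'] (c :: rest) = false := by
          simp [List.isPrefixOf]
          exact fun hq => hc hq.symm
        rw [show PySem.Chars.splitOn.go ['/'] (f + 1) (c :: rest) cur acc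
              = PySem.Chars.splitOn.go ['/'] f rest (c :: cur) acc by
            simp [PySem.Chars.splitOn.go, hpre]]
        rw [ih f (c :: cur) acc (by simpa using Nat.le_of_succ_le_succ h)]
        simp [pvSplitSlash, hc]

lemma splitOn_slash (l : List Char) :
    PySem.Chars.splitOn l ['/'] = (pvSplitSlash l).1 :: (pvSplitSlash l).2 := by
  unfold PySem.Chars.splitOn
  rw [go_slash l (l.length + 1) [] [] (by omega)]
  simp

-- the first truthy segment of the '/'-split is B's skip-then-take scan
lemma filter_head (t : List Char) (h : '?' ∉ t) :
    (((pvSplitSlash t).1 :: (pvSplitSlash t).2).filter (fun s => s ≠ [])).head? =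
      (if pvSeg (pvSkipSlash t) = [] then none else some (pvSeg (pvSkipSlash t))) := by
  induction t with
  | nil => simp [pvSplitSlash, pvSeg, pvSkipSlash]
  | cons c rest ih =>
    simp at h
    by_cases hc : c = '/'
    · subst hc
      simpa [pvSplitSlash, pvSkipSlash] using ih h.2
    · have hq : ¬ c = '?' := fun e => h.1 e.symm
      simp [pvSplitSlash, pvSkipSlash, pvSeg, hc, hq, splitSlash_fst rest h.2]

-- B's scan ignores everything from the first '?' on
lemma pvSeg_takeWhile (r : List Char) :
    pvSeg (r.takeWhile (· ≠ '?')) = pvSeg r := by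
  induction r with
  | nil => rfl
  | cons c rest ih =>
    by_cases hq : c = '?'
    · simp [hq, pvSeg]
    · by_cases hs : c = '/'
      · simp [pvSeg, hs]
      · simpa [pvSeg, hq, hs] using ih

lemma pvSkipSeg_takeWhile (l : List Char) :
    pvSeg (pvSkipSlash (l.takeWhile (· ≠ '?'))) = pvSeg (pvSkipSlash l) := by
  induction l with
  | nil => rfl
  | cons c rest ih =>
    by_cases hq : c = '?'
    · simp [hq, pvSkipSlash, pvSeg]
    · by_cases hs : c = '/'
      · simpa [pvSkipSlash, hq, hs] using ih
      · simpa [pvSkipSlash, pvSeg, hq, hs] using pvSeg_takeWhile rest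

-- A computes B's value on every nonempty path
lemma mem_takeWhile_ne (l : List Char) : '?' ∉ l.takeWhile (· ≠ '?') := by
  intro hm
  have := List.mem_takeWhile_imp hm
  simp at this

lemma filter_map_ofList (L : List (List Char)) :
    (L.map String.ofList).filter (fun s => s ≠ "") =
      (L.filter (fun s => s ≠ [])).map String.ofList := by
  induction L with
  | nil => rfl
  | cons x r ih =>
    by_cases hx : x = []
    · simpa [hx] using ih
    · simp only [List.map_cons, List.filter_cons]
      have h1 : (decide (String.ofList x ≠ "")) = true := by simp [hx]
      have h2 : (decide (x ≠ [])) = true := by simp [hx]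
      rw [h1, h2, ih]
      simp

lemma A_eq_B (path : String) (hne : path ≠ "") :
    top_prefix_py path = "/" ++ String.ofList (pvSeg (pvSkipSlash path.toList)) := by
  unfold top_prefix_py
  simp only [if_neg hne]
  -- step 1: split("?", 1)[0] is everything before the first '?'
  have h1 : (PySem.List.pyGet? ((PySem.Str.splitMax? path "?" 1).getD []) 0).getD ""
      = String.ofList (path.toList.takeWhile (· ≠ '?')) := by
    have hgo := go_max_one path.toList (path.toList.length + 1) [] [] (by omega)
    have hsm : PySem.Chars.splitOnMax path.toList ['?'] 1
        = PySem.Chars.splitOnMax.go ['?'] (path.toList.length + 1) 1 path.toList [] [] := by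
      simp [PySem.Chars.splitOnMax]
    rw [hgo] at hsm
    have hq : ("?" : String).toList = ['?'] := by decide
    by_cases hm : '?' ∈ path.toList <;>
      simp [PySem.Str.splitMax?, PySem.Chars.splitMax?, hq, hsm, hm,
        PySem.List.pyGet?, PySem.List.pyIdx?]
  rw [h1]
  -- step 2: the cleaned path as a char list (with or without the added slash)
  set t := path.toList.takeWhile (· ≠ '?') with ht
  have hnq : '?' ∉ t := mem_takeWhile_ne path.toList
  set clean := if PySem.Str.startswith (String.ofList t) "/"
      then String.ofList t else "/" ++ String.ofList t with hclean
  have hct : clean.toList = t ∨ clean.toList = '/' :: t := by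
    by_cases hsw : PySem.Str.startswith (String.ofList t) "/"
    · left; rw [hclean, if_pos hsw]; simp
    · right; rw [hclean, if_neg hsw]
      rw [String.toList_append]; simp
  have hcq : '?' ∉ clean.toList := by
    rcases hct with h | h <;> rw [h]
    · exact hnq
    · simp [hnq]
  -- step 3: split("/") and the truthy filter, moved to char lists
  have h3 : ((PySem.Str.split? clean "/").getD []).filter (fun s => s ≠ "")
      = List.map String.ofList
          ((((pvSplitSlash clean.toList).1 :: (pvSplitSlash clean.toList).2)).filter
            (fun s => s ≠ [])) := by
    have hsl : ("/" : String).toList = ['/'] := by decide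
    rw [show PySem.Str.split? clean "/"
          = some (List.map String.ofList
              ((pvSplitSlash clean.toList).1 :: (pvSplitSlash clean.toList).2)) by
        simp [PySem.Str.split?, PySem.Chars.split?, hsl, splitOn_slash]]
    simp only [Option.getD_some]
    exact filter_map_ofList _
  rw [h3]
  -- step 4: the first truthy segment is B's scan
  have h4 := filter_head clean.toList hcq
  have h5 : pvSeg (pvSkipSlash clean.toList) = pvSeg (pvSkipSlash path.toList) := by
    rcases hct with h | h <;> rw [h]
    · exact pvSkipSeg_takeWhile path.toList
    · show pvSeg (pvSkipSlash ('/' :: t)) = _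
      rw [show pvSkipSlash ('/' :: t) = pvSkipSlash t by simp [pvSkipSlash]]
      exact pvSkipSeg_takeWhile path.toList
  rw [h5] at h4
  by_cases hfs : pvSeg (pvSkipSlash path.toList) = []
  · have hF0 : (((pvSplitSlash clean.toList).1 :: (pvSplitSlash clean.toList).2)).filter
        (fun s => s ≠ []) = [] := by
      rw [← List.head?_eq_none_iff]; simpa [hfs] using h4
    rw [hfs, hF0]
    simp only [List.map_nil]
    have : String.ofList ([] : List Char) = "" := rfl
    rw [this]
    simp
  · have hne2 : (((pvSplitSlash clean.toList).1 :: (pvSplitSlash clean.toList).2)).filter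
        (fun s => s ≠ []) ≠ [] := by
      intro h0; rw [h0] at h4; simp [hfs] at h4
    obtain ⟨hd, tl, hF⟩ := List.exists_cons_of_ne_nil hne2
    rw [hF] at h4
    simp [hfs] at h4
    rw [hF]
    simp only [List.map_cons]
    rw [if_neg (by simp)]
    rw [show PySem.List.pyGet? (String.ofList hd :: List.map String.ofList tl) 0
          = some (String.ofList hd) by simp [PySem.List.pyGet?, PySem.List.pyIdx?]]
    rw [h4]
    rfl

-- ===== VERDICT (by name: the statement is the Claim_ definition above) =====
theorem top_prefix_py_spec : Claim_equal_top_prefix_py := by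
  intro path _
  unfold Spec_top_prefix_py top_prefix_py_alt
  by_cases hne : path = ""
  · subst hne; decide
  · exact A_eq_B path hne
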